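-- pv_equiv track=rewrite | github.com/vitdoan/Tokenization | p1.py | handle_abbreviation
-- ===== SOURCE A (Python) =====
-- def handle_abbreviation(word):
--     word_list = []
--     split_words = word.split('.')
--     is_single_word = True
--     for w in split_words:
--         if len(w) > 1:
--             word_list.append(w)
--             is_single_word = False
--         elif len(w) == 1:
--             if len(word_list) == 0:
--                 word_list.append(w)
--             elif is_single_word:
--                 word_list[len(word_list)-1] += w
--             else:
--                 word_list.append(w)
--             is_single_word = True
--     return word_list
-- ===== SOURCE B (Python) =====
-- def handle_abbreviation(word):
--     # Two-stage pass: drop empty pieces, then collapse maximal runs of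
--     # consecutive single-character tokens into one joined token.
--     tokens = [t for t in word.split('.') if t]
--     out = []
--     i = 0
--     n = len(tokens)
--     while i < n:
--         if len(tokens[i]) == 1:
--             j = i
--             while j < n and len(tokens[j]) == 1:
--                 j += 1
--             out.append(''.join(tokens[i:j]))
--             i = j
--         else:
--             out.append(tokens[i])
--             i += 1
--     return out
-- ===== Notes on version B (the rewrite author's own statement) =====
-- stated objective: idiomatic
-- what changed: Replaces A's single fold with a mutable flag and in-place last-element concatenation by a two-stage run-grouping pass: filter out empty pieces, then scan with an inner run pointer that joins each maximal run of consecutive single-character tokens in one step.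
import Mathlib
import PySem

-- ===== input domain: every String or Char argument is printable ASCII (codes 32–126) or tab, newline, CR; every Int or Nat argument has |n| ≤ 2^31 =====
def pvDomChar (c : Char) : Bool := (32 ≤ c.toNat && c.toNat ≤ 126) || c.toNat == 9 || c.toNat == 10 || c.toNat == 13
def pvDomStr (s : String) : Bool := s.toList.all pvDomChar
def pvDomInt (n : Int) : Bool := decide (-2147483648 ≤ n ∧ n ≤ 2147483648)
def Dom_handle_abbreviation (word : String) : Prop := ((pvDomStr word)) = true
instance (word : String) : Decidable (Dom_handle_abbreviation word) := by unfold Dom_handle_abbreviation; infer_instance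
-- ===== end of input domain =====

-- B groups maximal runs of consecutive single-character tokens (after dropping empty pieces)
-- instead of A's fold with a mutable flag; same values, proved equivalent on all inputs.


-- ===== PORT A =====
-- loop body of A: state = (word_list, is_single_word); branches in A's order
def pvStepA (st : List (List Char) × Bool) (w : List Char) : List (List Char) × Bool :=
  if 1 < w.length then (st.1 ++ [w], false)
  else if w.length = 1 then
    if st.1.length = 0 then (st.1 ++ [w], true)
    else if st.2 then (st.1.dropLast ++ [(st.1.getLast?.getD []) ++ w], true)
    else (st.1 ++ [w], true)
  else st

def handle_abbreviation (word : String) : List String :=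
  (((PySem.Chars.splitOn word.toList ['.']).foldl pvStepA ([], true)).1).map
    (fun cs => String.ofList cs)

-- ===== PORT B =====
-- the outer while-loop of B: at a single-char token, take the whole run and join it
def groupRuns : List (List Char) → List (List Char)
  | [] => []
  | t :: rest =>
    if t.length = 1 then
      PySem.Chars.join [] (t :: rest.takeWhile (fun w => w.length = 1)) ::
        groupRuns (rest.dropWhile (fun w => w.length = 1))
    else t :: groupRuns rest
termination_by ts => ts.length
decreasing_by
· exact Nat.lt_succ_of_le (List.length_dropWhile_le _ _)
· simp

def handle_abbreviation_alt (word : String) : List String :=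
  (groupRuns ((PySem.Chars.splitOn word.toList ['.']).filter (fun t => !t.isEmpty))).map
    (fun cs => String.ofList cs)

-- ===== PRECONDITION & SPEC =====
def Spec_handle_abbreviation (word : String) (out : List String) : Prop := out = handle_abbreviation_alt word
instance (word : String) (out : List String) : Decidable (Spec_handle_abbreviation word out) := by unfold Spec_handle_abbreviation; infer_instance

-- ===== CLAIM (what is proved, stated in full; the proofs are below) =====
def Claim_equal_handle_abbreviation : Prop := ∀ (word : String), Dom_handle_abbreviation word → Spec_handle_abbreviation word (handle_abbreviation word)

-- ===== LEMMAS AND PROOFS =====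

-- the pending group of B's inner loop: s plus the rest of the current single-char run
def contJoin (s : List Char) (ts : List (List Char)) : List (List Char) :=
  (s ++ (ts.takeWhile (fun w => w.length = 1)).flatten) ::
    groupRuns (ts.dropWhile (fun w => w.length = 1))

lemma join_nil_flatten (l : List (List Char)) : PySem.Chars.join [] l = l.flatten := by
  induction l with
  | nil => rfl
  | cons a l ih =>
    cases l with
    | nil => simp [PySem.Chars.join, List.intercalate]
    | cons b r =>
      simp only [PySem.Chars.join, List.intercalate] at *
      simp [List.intersperse] at *
      simp [ih]

lemma groupRuns_single {w : List Char} (h : w.length = 1) (r : List (List Char)) :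
    groupRuns (w :: r) = contJoin w r := by
  rw [groupRuns, if_pos h, contJoin, join_nil_flatten]
  simp

lemma groupRuns_multi {w : List Char} (h : ¬ w.length = 1) (r : List (List Char)) :
    groupRuns (w :: r) = w :: groupRuns r := by
  rw [groupRuns, if_neg h]

lemma key (ts : List (List Char)) :
    (∀ acc, (List.foldl pvStepA (acc, false) ts).1
        = acc ++ groupRuns (ts.filter (fun t => !t.isEmpty)))
  ∧ (∀ pre s, (List.foldl pvStepA (pre ++ [s], true) ts).1
        = pre ++ contJoin s (ts.filter (fun t => !t.isEmpty)))
  ∧ ((List.foldl pvStepA ([], true) ts).1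
        = groupRuns (ts.filter (fun t => !t.isEmpty))) := by
  induction ts with
  | nil =>
    refine ⟨fun acc => by simp [groupRuns], fun pre s => by simp [contJoin, groupRuns], by simp [groupRuns]⟩
  | cons w r ih =>
    obtain ⟨ih1, ih2, ih3⟩ := ih
    refine ⟨?_, ?_, ?_⟩
    · intro acc
      by_cases h1 : 1 < w.length
      · have hne : ¬ w.length = 1 := by omega
        have hnE : (!w.isEmpty) = true := by cases w with | nil => simp at h1 | cons c t => simp
        simp only [List.foldl_cons, pvStepA, if_pos h1, List.filter_cons, hnE, if_pos]
        rw [ih1, groupRuns_multi hne]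
        simp
      · by_cases h2 : w.length = 1
        · have hnE : (!w.isEmpty) = true := by cases w with | nil => simp at h2 | cons c t => simp
          have hstep : pvStepA (acc, false) w = (acc ++ [w], true) := by
            simp only [pvStepA, if_neg h1, if_pos h2]
            by_cases hacc : acc.length = 0 <;> simp [hacc]
          simp only [List.foldl_cons, hstep, List.filter_cons, hnE, if_pos]
          rw [ih2, groupRuns_single h2]
        · have h0 : w.length = 0 := by omega
          have hE : (!w.isEmpty) = false := by rw [List.length_eq_zero_iff.mp h0]; rfl
          have hstep : pvStepA (acc, false) w = (acc, false) := by
            simp [pvStepA, h0]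
          simp only [List.foldl_cons, hstep, List.filter_cons, hE]
          exact ih1 acc
    · intro pre s
      by_cases h1 : 1 < w.length
      · have hne : ¬ w.length = 1 := by omega
        have hnE : (!w.isEmpty) = true := by cases w with | nil => simp at h1 | cons c t => simp
        simp only [List.foldl_cons, pvStepA, if_pos h1, List.filter_cons, hnE, if_pos]
        have : pre ++ [s] ++ [w] = (pre ++ [s, w]) := by simp
        rw [this, ih1, contJoin]
        have ht : (List.takeWhile (fun t => t.length = 1)
            (w :: List.filter (fun t => !t.isEmpty) r)) = [] := by
          simp [List.takeWhile, hne]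
        have hd : (List.dropWhile (fun t => t.length = 1)
            (w :: List.filter (fun t => !t.isEmpty) r)) =
            w :: List.filter (fun t => !t.isEmpty) r := by
          simp [List.dropWhile, hne]
        rw [ht, hd, groupRuns_multi hne]
        simp
      · by_cases h2 : w.length = 1
        · have hnE : (!w.isEmpty) = true := by cases w with | nil => simp at h2 | cons c t => simp
          have hstep : pvStepA (pre ++ [s], true) w = (pre ++ [s ++ w], true) := by
            simp [pvStepA, if_neg h1, if_pos h2]
          simp only [List.foldl_cons, hstep, List.filter_cons, hnE, if_pos]
          rw [ih2, contJoin, contJoin]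
          have ht : (List.takeWhile (fun t => t.length = 1)
              (w :: List.filter (fun t => !t.isEmpty) r)) =
              w :: List.takeWhile (fun t => t.length = 1)
                (List.filter (fun t => !t.isEmpty) r) := by
            simp [List.takeWhile, h2]
          have hd : (List.dropWhile (fun t => t.length = 1)
              (w :: List.filter (fun t => !t.isEmpty) r)) =
              List.dropWhile (fun t => t.length = 1)
                (List.filter (fun t => !t.isEmpty) r) := by
            simp [List.dropWhile, h2]
          rw [ht, hd]
          simp
        · have h0 : w.length = 0 := by omega
          have hE : (!w.isEmpty) = false := by rw [List.length_eq_zero_iff.mp h0]; rfl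
          have hstep : pvStepA (pre ++ [s], true) w = (pre ++ [s], true) := by
            simp [pvStepA, h0]
          simp only [List.foldl_cons, hstep, List.filter_cons, hE]
          exact ih2 pre s
    · by_cases h1 : 1 < w.length
      · have hne : ¬ w.length = 1 := by omega
        have hnE : (!w.isEmpty) = true := by cases w with | nil => simp at h1 | cons c t => simp
        have hstep : pvStepA ([], true) w = ([w], false) := by
          simp [pvStepA, if_pos h1]
        simp only [List.foldl_cons, hstep, List.filter_cons, hnE, if_pos]
        rw [ih1, groupRuns_multi hne]
        simp
      · by_cases h2 : w.length = 1
        · have hnE : (!w.isEmpty) = true := by cases w with | nil => simp at h2 | cons c t => simp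
          have hstep : pvStepA ([], true) w = ([] ++ [w], true) := by
            simp [pvStepA, if_neg h1, if_pos h2]
          simp only [List.foldl_cons, hstep, List.filter_cons, hnE, if_pos]
          rw [ih2, groupRuns_single h2]
          simp
        · have h0 : w.length = 0 := by omega
          have hE : (!w.isEmpty) = false := by rw [List.length_eq_zero_iff.mp h0]; rfl
          have hstep : pvStepA ([], true) w = ([], true) := by
            simp [pvStepA, h0]
          simp only [List.foldl_cons, hstep, List.filter_cons, hE]
          exact ih3

-- ===== VERDICT (by name: the statement is the Claim_ definition above) =====
theorem handle_abbreviation_spec : Claim_equal_handle_abbreviation := by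
  intro word _
  unfold Spec_handle_abbreviation handle_abbreviation handle_abbreviation_alt
  rw [(key (PySem.Chars.splitOn word.toList ['.'])).2.2]
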